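-- pv_equiv track=rewrite | github.com/miliar/Code_Jam_Webscraper | solutions_python/Problem_55/60.py | solve
-- ===== SOURCE A (Python) =====
-- def solve(R, k, q):
--     i=0
--     _key=''
--     _sum=0
--     _l = []
--     _d = dict()
--     len_q = len(q)
--     key_len=0
--     repeat = False
--     while True:
--         if (_sum+q[i])>k or key_len>=len_q:
--             if repeat==True and _key in _d:
--                 break
--             else:
--                 _l.append((_key, _sum))
--                 _d[_key]=len(_l)-1
--                 _sum=0
--                 _key=''
--                 key_len=0
--                 if len(_l)>=R:
--                     return sum([x[1] for x in _l])
--         else: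
--             _key=_key+','+str(q[i])+'-'+str(i)
--             _sum=_sum+q[i]
--             i=(i+1)%len_q
--
--             if repeat==False and i==0:
--                 repeat=True
--
--             key_len=key_len+1
--
--
--     i = _d[_key]
--     sec = len(_l) - i
--     sum_sec_t = (R-i)//sec
--     sum_sec = sum(x[1] for x in _l[i:]) * sum_sec_t
--     sum_sec_m = (R-i)%sec
--     ans = sum(x[1] for x in _l[0:i]) + sum_sec + sum(x[1] for x in _l[i:i+sum_sec_m])
--
--     return ans
-- ===== SOURCE B (Python) =====
-- def solve(R, k, q):
--     # Precompute, for every start index s, the load and next start of the ride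
--     # that begins at s (the ride is a pure function of s), giving a functional
--     # graph on {0..n-1}; then advance R steps at once by binary lifting:
--     # doubling jump tables, one doubling per bit of R. No cycle detection.
--     n = len(q)
--     load = []
--     nxt = []
--     for s in range(n):
--         tot = 0
--         i = s
--         cnt = 0
--         while cnt < n and tot + q[i] <= k:
--             tot += q[i]
--             i = (i + 1) % n
--             cnt += 1
--         load.append(tot)
--         nxt.append(i)
--     ans = 0
--     s = 0
--     r = R
--     while r > 0:
--         if r & 1:
--             ans += load[s]
--             s = nxt[s]
--         load = [load[t] + load[nxt[t]] for t in range(n)]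
--         nxt = [nxt[nxt[t]] for t in range(n)]
--         r >>= 1
--     return ans
-- ===== Notes on version B (the rewrite author's own statement) =====
-- stated objective: alternative
-- what changed: A simulates rides one by one, detecting a repeated state via an O(n)-long string key per ride stored in a dict, then extrapolates the found cycle arithmetically; B does no cycle detection at all: it precomputes for every start index the ride's load and next start (a functional graph on the n start indices) and then advances R steps at once by binary lifting, doubling the jump tables once per bit of R.
-- outside the precondition, e.g. on solve(0, 5, [3]): A returns 3, B returns 0
import Mathlib
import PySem

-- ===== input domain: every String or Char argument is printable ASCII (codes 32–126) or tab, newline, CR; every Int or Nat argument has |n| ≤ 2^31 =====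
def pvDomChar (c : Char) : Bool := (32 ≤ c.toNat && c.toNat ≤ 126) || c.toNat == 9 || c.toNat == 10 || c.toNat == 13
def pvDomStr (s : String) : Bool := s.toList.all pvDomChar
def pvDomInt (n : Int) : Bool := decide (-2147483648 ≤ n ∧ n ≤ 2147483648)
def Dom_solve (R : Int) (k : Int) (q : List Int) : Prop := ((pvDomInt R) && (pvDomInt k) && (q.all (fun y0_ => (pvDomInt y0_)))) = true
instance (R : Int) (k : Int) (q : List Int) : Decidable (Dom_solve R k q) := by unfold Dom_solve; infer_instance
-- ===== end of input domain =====

-- B replaces A's per-ride string-key/dict cycle detection and cycle extrapolation by a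
-- per-start-index precompute (functional graph of rides) followed by binary lifting over
-- the bits of R; equivalence is about the return value (neither version mutates arguments).

-- ===== PORT A =====
-- A's `while True` loop, flattened; Python strings are modelled as List Char.
-- The fuel argument only makes the loop total; it is provably never exhausted
-- under Pre_solve (the loop runs at most one ride, ≤ len q + 1 steps, per appended entry).
def solveLoop (R k : Int) (q : List Int) : Nat → Int → List Char → Int →
    List (List Char × Int) → PySem.Dict (List Char) Int → Int → Bool → Int
  | 0, _, _, _, _, _, _, _ => 0
  | fuel+1, i, key, sm, l, d, keyLen, rep =>
    match PySem.List.pyGet? q i with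
    | none => 0   -- q[i] raises IndexError (reached only when q = [], excluded by Pre_solve)
    | some qi =>
      if sm + qi > k ∨ keyLen ≥ PySem.List.len q then
        if rep && d.contains key then
          -- the `break`: the code after A's loop, inlined at the point of the break
          let i' := d.getD key 0
          let sec : Int := (l.length : Int) - i'
          let sumSecT := PySem.Int.floordiv (R - i') sec
          let sumSec := ((PySem.List.slice l (some i') none).map (·.2)).sum * sumSecT
          let sumSecM := PySem.Int.mod (R - i') sec
          ((PySem.List.slice l (some 0) (some i')).map (·.2)).sum + sumSec +
            ((PySem.List.slice l (some i') (some (i' + sumSecM))).map (·.2)).sum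
        else
          let l' := l ++ [(key, sm)]
          let d' := d.insert key ((l'.length : Int) - 1)
          if (l'.length : Int) ≥ R then (l'.map (·.2)).sum
          else solveLoop R k q fuel i [] 0 l' d' 0 rep
      else
        let key' := key ++ ',' :: PySem.Int.toChars qi ++ '-' :: PySem.Int.toChars i
        let i' := PySem.Int.mod (i + 1) (PySem.List.len q)
        let rep' := if rep = false ∧ i' = 0 then true else rep
        solveLoop R k q fuel i' key' (sm + qi) l d (keyLen + 1) rep'

def solve (R : Int) (k : Int) (q : List Int) : Int :=
  solveLoop R k q ((R.toNat + 1) * (q.length + 1) + 1) 0 [] 0 [] PySem.Dict.empty 0 false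

-- ===== PORT B =====
-- Source B's inner `while cnt < n and total + q[i] <= k` loop (cnt counts up to n; here n - cnt is the fuel)
def altRide (k : Int) (q : List Int) : Nat → Int → Int → Int × Int
  | 0, total, i => (total, i)
  | f+1, total, i =>
    if total + PySem.List.pyGetD q i 0 ≤ k then
      altRide k q f (total + PySem.List.pyGetD q i 0) (PySem.Int.mod (i + 1) (PySem.List.len q))
    else (total, i)

-- Source B's `while r > 0` binary-lifting loop; the fuel only makes it total (r halves each pass,
-- so R.toNat + 1 passes always suffice)
def altBits (q : List Int) : Nat → Int → Int → Int → List Int → List Int → Int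
  | 0, _, ans, _, _, _ => ans
  | f+1, r, ans, s, load, nxt =>
    if r > 0 then
      let odd := PySem.Int.mod r 2 == 1   -- r & 1 on r > 0
      let ans' := if odd then ans + PySem.List.pyGetD load s 0 else ans
      let s' := if odd then PySem.List.pyGetD nxt s 0 else s
      let load' := (List.range q.length).map (fun (t : Nat) =>
        PySem.List.pyGetD load (t : Int) 0 +
        PySem.List.pyGetD load (PySem.List.pyGetD nxt (t : Int) 0) 0)
      let nxt' := (List.range q.length).map (fun (t : Nat) =>
        PySem.List.pyGetD nxt (PySem.List.pyGetD nxt (t : Int) 0) 0)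
      altBits q f (PySem.Int.floordiv r 2) ans' s' load' nxt'
    else ans

def solve_alt (R : Int) (k : Int) (q : List Int) : Int :=
  -- `for s in range(n): … load.append(tot); nxt.append(i)`
  let tabs := (List.range q.length).foldl
    (fun (p : List Int × List Int) (s : Nat) =>
      let r := altRide k q q.length 0 (s : Int)
      (p.1 ++ [r.1], p.2 ++ [r.2]))
    ([], [])
  altBits q (R.toNat + 1) R 0 0 tabs.1 tabs.2

-- ===== PRECONDITION & SPEC =====
-- Pre_solve excludes q = [], on which A raises IndexError at q[0] (B's bit loop also hits an
-- IndexError there), and non-positive ride counts R, outside the task's natural domain (R is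
-- a number of rides), where A still returns the load of one ride instead of none.
def Pre_solve (R : Int) (k : Int) (q : List Int) : Prop := 1 ≤ R ∧ q ≠ []
instance (R : Int) (k : Int) (q : List Int) : Decidable (Pre_solve R k q) := by
  unfold Pre_solve; infer_instance

def pvWitness_solve : Int × Int × List Int := (2, 3, [1, 2])

def Spec_solve (R : Int) (k : Int) (q : List Int) (out : Int) : Prop := out = solve_alt R k q
instance (R : Int) (k : Int) (q : List Int) (out : Int) : Decidable (Spec_solve R k q out) := by
  unfold Spec_solve; infer_instance

-- ===== CLAIM (what is proved, stated in full; the proofs are below) =====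
def Claim_equal_solve : Prop := ∀ (R : Int) (k : Int) (q : List Int),
  Dom_solve R k q → Pre_solve R k q → Spec_solve R k q (solve R k q)

-- ===== LEMMAS AND PROOFS =====

-- ---- the abstract model: one ride of the gondola, as a function of its start index ----
-- rideM k q f tot s rep = (boarded (value, index) pairs, final load, next start, repeat flag)
def rideM (k : Int) (q : List Int) : Nat → Int → Nat → Bool → List (Int × Nat) × Int × Nat × Bool
  | 0, tot, s, rep => ([], tot, s, rep)
  | f+1, tot, s, rep =>
    if tot + q.getD s 0 ≤ k then
      let s' := (s + 1) % q.length
      let r := rideM k q f (tot + q.getD s 0) s' (rep || decide (s' = 0))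
      ((q.getD s 0, s) :: r.1, r.2)
    else ([], tot, s, rep)

def trAt (k : Int) (q : List Int) (s : Nat) : List (Int × Nat) := (rideM k q q.length 0 s false).1
def loadOf (k : Int) (q : List Int) (s : Nat) : Int := (rideM k q q.length 0 s false).2.1
def nxt (k : Int) (q : List Int) (s : Nat) : Nat := (rideM k q q.length 0 s false).2.2.1

def sAt (k : Int) (q : List Int) : Nat → Nat
  | 0 => 0
  | t+1 => nxt k q (sAt k q t)

def aAt (k : Int) (q : List Int) (t : Nat) : Int := loadOf k q (sAt k q t)

-- Python str-key of ride t
def seg (p : Int × Nat) : List Char := ',' :: PySem.Int.toChars p.1 ++ '-' :: PySem.Int.toChars (p.2 : Int)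
def enc (tr : List (Int × Nat)) : List Char := tr.flatMap seg
def keyAt (k : Int) (q : List Int) (t : Nat) : List Char := enc (trAt k q (sAt k q t))

def Fseg (k : Int) (q : List Int) (j len : Nat) : Int := ((List.range' j len).map (aAt k q)).sum

def lAt (k : Int) (q : List Int) (t : Nat) : List (List Char × Int) :=
  (List.range t).map (fun u => (keyAt k q u, aAt k q u))
def mkD (k : Int) (q : List Int) (t : Nat) : PySem.Dict (List Char) Int :=
  (List.range t).foldl (fun d u => d.insert (keyAt k q u) (u : Int)) PySem.Dict.empty

-- ---- basic facts about rideM ----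
theorem rideM_rep_any (k : Int) (q : List Int) : ∀ (f : Nat) (tot : Int) (s : Nat) (rep : Bool),
    (rideM k q f tot s rep).1 = (rideM k q f tot s false).1 ∧
    (rideM k q f tot s rep).2.1 = (rideM k q f tot s false).2.1 ∧
    (rideM k q f tot s rep).2.2.1 = (rideM k q f tot s false).2.2.1 := by
  intro f
  induction f with
  | zero => intro tot s rep; simp [rideM]
  | succ f ih =>
    intro tot s rep
    simp only [rideM]
    split
    · simp only [List.cons.injEq, true_and]
      obtain ⟨h1, h2, h3⟩ := ih (tot + q.getD s 0) ((s+1) % q.length) (rep || decide ((s+1) % q.length = 0))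
      obtain ⟨h1', h2', h3'⟩ := ih (tot + q.getD s 0) ((s+1) % q.length) (false || decide ((s+1) % q.length = 0))
      exact ⟨h1.trans h1'.symm, h2.trans h2'.symm, h3.trans h3'.symm⟩
    · simp

theorem rideM_len_le (k : Int) (q : List Int) : ∀ (f : Nat) (tot : Int) (s : Nat) (rep : Bool),
    (rideM k q f tot s rep).1.length ≤ f := by
  intro f
  induction f with
  | zero => intro tot s rep; simp [rideM]
  | succ f ih =>
    intro tot s rep
    simp only [rideM]
    split
    · simpa using ih _ _ _
    · simp

theorem rideM_s_lt (k : Int) (q : List Int) : ∀ (f : Nat) (tot : Int) (s : Nat) (rep : Bool),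
    s < q.length → (rideM k q f tot s rep).2.2.1 < q.length := by
  intro f
  induction f with
  | zero => intro tot s rep h; simpa [rideM] using h
  | succ f ih =>
    intro tot s rep h
    simp only [rideM]
    split
    · exact ih _ _ _ (Nat.mod_lt _ (by omega))
    · simpa using h

theorem rideM_end (k : Int) (q : List Int) : ∀ (f : Nat) (tot : Int) (s : Nat) (rep : Bool),
    (rideM k q f tot s rep).1.length = f ∨
      (rideM k q f tot s rep).2.1 + q.getD (rideM k q f tot s rep).2.2.1 0 > k := by
  intro f
  induction f with
  | zero => intro tot s rep; simp [rideM]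
  | succ f ih =>
    intro tot s rep
    simp only [rideM]
    split
    · rcases ih (tot + q.getD s 0) ((s+1) % q.length) (rep || decide ((s+1) % q.length = 0)) with h | h
      · left; simpa using h
      · right; simpa using h
    · next h => right; simpa [List.getD] using not_le.mp h

theorem rideM_head (k : Int) (q : List Int) (f : Nat) (tot : Int) (s : Nat) (rep : Bool)
    (p : Int × Nat) (r : List (Int × Nat)) (h : (rideM k q f tot s rep).1 = p :: r) :
    p.2 = s := by
  cases f with
  | zero => simp [rideM] at h
  | succ f =>
    simp only [rideM] at h
    split at h
    · simp only [List.cons.injEq] at h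
      rw [← h.1]
    · simp at h

theorem rideM_nil (k : Int) (q : List Int) (f : Nat) (tot : Int) (s : Nat) (rep : Bool)
    (hf : 0 < f) (h : (rideM k q f tot s rep).1 = []) :
    (rideM k q f tot s rep).2.1 = tot ∧ (rideM k q f tot s rep).2.2.1 = s := by
  cases f with
  | zero => omega
  | succ f =>
    by_cases hc : tot + q.getD s 0 ≤ k
    · simp only [rideM, if_pos hc] at h
      simp at h
    · simp only [rideM]
      rw [if_neg hc]
      exact ⟨rfl, rfl⟩

theorem sAt_lt (k : Int) (q : List Int) (hq : q ≠ []) : ∀ t, sAt k q t < q.length := by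
  intro t
  induction t with
  | zero =>
    have := List.length_pos_of_ne_nil hq
    unfold sAt; omega
  | succ t ih => exact rideM_s_lt k q _ _ _ _ ih

-- ---- digits / key injectivity ----
def val10 (l : List Char) : Nat := l.foldl (fun a c => a * 10 + (c.toNat - 48)) 0

theorem toDigitsCore_digits : ∀ (f n : Nat) (acc : List Char),
    (∀ c ∈ acc, c.isDigit = true) → ∀ c ∈ Nat.toDigitsCore 10 f n acc, c.isDigit = true := by
  intro f
  induction f with
  | zero => intro n acc hacc; simpa [Nat.toDigitsCore] using hacc
  | succ f ih =>
    intro n acc hacc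
    simp only [Nat.toDigitsCore]
    split
    · intro c hc
      rcases List.mem_cons.mp hc with rfl | hc
      · simp [Nat.isDigit_digitChar, Nat.mod_lt n (by norm_num : (0:Nat) < 10)]
      · exact hacc c hc
    · refine ih _ _ ?_
      intro c hc
      rcases List.mem_cons.mp hc with rfl | hc
      · simp [Nat.isDigit_digitChar, Nat.mod_lt n (by norm_num : (0:Nat) < 10)]
      · exact hacc c hc

theorem toDigits_digits (n : Nat) : ∀ c ∈ Nat.toDigits 10 n, c.isDigit = true :=
  toDigitsCore_digits (n+1) n [] (by simp)

theorem toDigitsCore_append : ∀ (f n : Nat) (l : List Char),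
    Nat.toDigitsCore 10 f n l = Nat.toDigitsCore 10 f n [] ++ l := by
  intro f
  induction f with
  | zero => intro n l; simp [Nat.toDigitsCore]
  | succ f ih =>
    intro n l
    simp only [Nat.toDigitsCore]
    split
    · simp
    · rw [ih (n/10) [(n % 10).digitChar], ih (n/10) ((n % 10).digitChar :: l)]
      simp

theorem toDigitsCore_fuel : ∀ (f g n : Nat), n < f → n < g →
    Nat.toDigitsCore 10 f n [] = Nat.toDigitsCore 10 g n [] := by
  intro f
  induction f with
  | zero => omega
  | succ f ih =>
    intro g n hf hg
    cases g with
    | zero => omega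
    | succ g =>
      simp only [Nat.toDigitsCore]
      split
      · rfl
      · next h =>
        rw [toDigitsCore_append f, toDigitsCore_append g, ih g (n/10) (by omega) (by omega)]

theorem toDigits10_def (n : Nat) : Nat.toDigits 10 n =
    if n < 10 then [Nat.digitChar n] else Nat.toDigits 10 (n / 10) ++ [Nat.digitChar (n % 10)] := by
  show Nat.toDigitsCore 10 (n+1) n [] = _
  simp only [Nat.toDigitsCore]
  split
  · next h =>
    have h10 : n < 10 := by omega
    simp [if_pos h10, Nat.mod_eq_of_lt h10]
  · next h =>
    have h10 : ¬ n < 10 := by omega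
    rw [if_neg h10, toDigitsCore_append n]
    congr 1
    show _ = Nat.toDigitsCore 10 (n/10+1) (n/10) []
    exact toDigitsCore_fuel n (n/10+1) (n/10) (by omega) (by omega)

theorem digitChar_val {d : Nat} (h : d < 10) : (Nat.digitChar d).toNat - 48 = d := by
  interval_cases d <;> rfl

theorem val10_toDigits (n : Nat) : val10 (Nat.toDigits 10 n) = n := by
  induction n using Nat.strong_induction_on with
  | _ n ih =>
    rw [toDigits10_def]
    by_cases h : n < 10
    · rw [if_pos h]
      simp [val10, List.foldl, digitChar_val h]
    · rw [if_neg h]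
      have : val10 (Nat.toDigits 10 (n/10) ++ [Nat.digitChar (n % 10)])
          = val10 (Nat.toDigits 10 (n/10)) * 10 + ((Nat.digitChar (n % 10)).toNat - 48) := by
        simp [val10, List.foldl_append]
      rw [this, ih (n/10) (by omega), digitChar_val (Nat.mod_lt n (by norm_num))]
      omega

theorem toDigits10_inj {a b : Nat} (h : Nat.toDigits 10 a = Nat.toDigits 10 b) : a = b := by
  have := congrArg val10 h
  rwa [val10_toDigits, val10_toDigits] at this

theorem toCharsNat (s : Nat) : PySem.Int.toChars (s : Int) = Nat.toDigits 10 s := by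
  simp [PySem.Int.toChars]

theorem toChars_no_comma (x : Int) : ',' ∉ PySem.Int.toChars x := by
  unfold PySem.Int.toChars
  split
  · intro h
    rcases List.mem_cons.mp h with h | h
    · exact absurd h (by decide)
    · have := toDigits_digits x.natAbs ',' h
      exact absurd this (by decide)
  · intro h
    have := toDigits_digits x.toNat ',' h
    exact absurd this (by decide)

theorem toCharsNat_no_dash (s : Nat) : '-' ∉ PySem.Int.toChars ((s : Nat) : Int) := by
  rw [toCharsNat]
  intro h
  have := toDigits_digits s '-' h
  exact absurd this (by decide)

theorem dash_split : ∀ (a1 a2 b1 b2 : List Char), '-' ∉ b1 → '-' ∉ b2 →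
    a1 ++ '-' :: b1 = a2 ++ '-' :: b2 → a1 = a2 ∧ b1 = b2 := by
  intro a1
  induction a1 with
  | nil =>
    intro a2 b1 b2 h1 h2 he
    cases a2 with
    | nil => simpa using he
    | cons c a2 =>
      simp only [List.nil_append, List.cons_append, List.cons.injEq] at he
      exact absurd (he.2 ▸ List.mem_append_right a2 (List.mem_cons_self)) h1
  | cons c a1 ih =>
    intro a2 b1 b2 h1 h2 he
    cases a2 with
    | nil =>
      simp only [List.nil_append, List.cons_append, List.cons.injEq] at he
      exact absurd (he.2.symm ▸ List.mem_append_right a1 (List.mem_cons_self)) h2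
    | cons c' a2 =>
      simp only [List.cons_append, List.cons.injEq] at he
      obtain ⟨h3, h4⟩ := ih a2 b1 b2 h1 h2 he.2
      exact ⟨by rw [he.1, h3], h4⟩

theorem comma_split : ∀ (b1 b2 r1 r2 : List Char), ',' ∉ b1 → ',' ∉ b2 →
    (r1 = [] ∨ ∃ u, r1 = ',' :: u) → (r2 = [] ∨ ∃ u, r2 = ',' :: u) →
    b1 ++ r1 = b2 ++ r2 → b1 = b2 ∧ r1 = r2 := by
  intro b1
  induction b1 with
  | nil =>
    intro b2 r1 r2 h1 h2 hr1 hr2 he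
    cases b2 with
    | nil => simpa using he
    | cons c b2 =>
      simp only [List.nil_append, List.cons_append] at he
      rcases hr1 with rfl | ⟨u, rfl⟩
      · exact absurd he (by simp)
      · simp only [List.cons.injEq] at he
        exact absurd (he.1.symm ▸ List.mem_cons_self) h2
  | cons c b1 ih =>
    intro b2 r1 r2 h1 h2 hr1 hr2 he
    cases b2 with
    | nil =>
      simp only [List.nil_append, List.cons_append] at he
      rcases hr2 with rfl | ⟨u, rfl⟩
      · exact absurd he.symm (by simp)
      · simp only [List.cons.injEq] at he
        exact absurd (he.1 ▸ List.mem_cons_self) h1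
    | cons c' b2 =>
      simp only [List.cons_append, List.cons.injEq] at he
      obtain ⟨h3, h4⟩ := ih b2 r1 r2 (fun h => h1 (List.mem_cons_of_mem _ h))
        (fun h => h2 (List.mem_cons_of_mem _ h)) hr1 hr2 he.2
      exact ⟨by rw [he.1, h3], h4⟩

theorem enc_comma_headed (tr : List (Int × Nat)) : enc tr = [] ∨ ∃ u, enc tr = ',' :: u := by
  cases tr with
  | nil => left; rfl
  | cons p r => right; exact ⟨_, rfl⟩

theorem seg_body_no_comma (p : Int × Nat) :
    ',' ∉ PySem.Int.toChars p.1 ++ '-' :: PySem.Int.toChars ((p.2 : Nat) : Int) := by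
  intro h
  rcases List.mem_append.mp h with h | h
  · exact toChars_no_comma p.1 h
  · rcases List.mem_cons.mp h with h | h
    · exact absurd h (by decide)
    · rw [toCharsNat] at h
      have := toDigits_digits p.2 ',' h
      exact absurd this (by decide)

theorem enc_head_start : ∀ (tr1 tr2 : List (Int × Nat)), enc tr1 = enc tr2 →
    (tr1 = [] ∧ tr2 = []) ∨
    (∃ x1 x2 s r1 r2, tr1 = (x1, s) :: r1 ∧ tr2 = (x2, s) :: r2) := by
  intro tr1 tr2 he
  cases tr1 with
  | nil =>
    cases tr2 with
    | nil => exact Or.inl ⟨rfl, rfl⟩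
    | cons p r => exact absurd he.symm (by simp [enc, seg])
  | cons p1 r1 =>
    cases tr2 with
    | nil => exact absurd he (by simp [enc, seg])
    | cons p2 r2 =>
      right
      simp only [enc, List.flatMap_cons, seg, List.cons_append, List.cons.injEq] at he
      have he2 : (PySem.Int.toChars p1.1 ++ '-' :: PySem.Int.toChars (p1.2 : Int)) ++ enc r1
          = (PySem.Int.toChars p2.1 ++ '-' :: PySem.Int.toChars (p2.2 : Int)) ++ enc r2 := by
        simpa [enc] using he.2
      obtain ⟨hb, -⟩ := comma_split _ _ _ _ (seg_body_no_comma p1) (seg_body_no_comma p2)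
        (enc_comma_headed r1) (enc_comma_headed r2) he2
      obtain ⟨-, hd⟩ := dash_split _ _ _ _ (toCharsNat_no_dash p1.2) (toCharsNat_no_dash p2.2) hb
      have : p1.2 = p2.2 := by
        rw [toCharsNat, toCharsNat] at hd
        exact toDigits10_inj hd
      exact ⟨p1.1, p2.1, p1.2, r1, r2, rfl, by rw [this]⟩

-- ---- dictionaries built by inserting u ↦ keyf u for u < t ----
theorem contains_dOf {κ : Type} [BEq κ] [LawfulBEq κ] (keyf : Nat → κ) : ∀ (t : Nat) (x : κ),
    (((List.range t).foldl (fun d u => d.insert (keyf u) (u : Int)) PySem.Dict.empty).contains x) = true ↔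
    ∃ u, u < t ∧ keyf u = x := by
  intro t
  induction t with
  | zero => intro x; simp [PySem.Dict.contains_empty]
  | succ t ih =>
    intro x
    rw [List.range_succ, List.foldl_append]
    simp only [List.foldl_cons, List.foldl_nil]
    rw [PySem.Dict.contains_insert]
    constructor
    · intro h
      rcases Bool.or_eq_true_iff.mp h with h | h
      · exact ⟨t, by omega, (eq_of_beq h).symm⟩
      · obtain ⟨u, hu, he⟩ := (ih x).mp h
        exact ⟨u, by omega, he⟩
    · rintro ⟨u, hu, rfl⟩
      rcases Nat.lt_succ_iff_lt_or_eq.mp hu with hu | rfl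
      · exact Bool.or_eq_true_iff.mpr (Or.inr ((ih _).mpr ⟨u, hu, rfl⟩))
      · exact Bool.or_eq_true_iff.mpr (Or.inl (by simp))

theorem getD_dOf {κ : Type} [BEq κ] [LawfulBEq κ] (keyf : Nat → κ) : ∀ (t : Nat) (x : κ),
    (∃ u, u < t ∧ keyf u = x) →
    ∃ j, j < t ∧ keyf j = x ∧
      ((List.range t).foldl (fun d u => d.insert (keyf u) (u : Int)) PySem.Dict.empty).getD x 0 = (j : Int) := by
  intro t
  induction t with
  | zero => intro x ⟨u, hu, _⟩; omega
  | succ t ih =>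
    intro x hex
    rw [List.range_succ, List.foldl_append]
    simp only [List.foldl_cons, List.foldl_nil]
    by_cases hx : x = keyf t
    · subst hx
      exact ⟨t, by omega, rfl, by rw [PySem.Dict.getD_insert_self]⟩
    · obtain ⟨u, hu, he⟩ := hex
      have hut : u < t := by
        rcases Nat.lt_succ_iff_lt_or_eq.mp hu with h | rfl
        · exact h
        · exact absurd he.symm hx
      obtain ⟨j, hj, hje, hgd⟩ := ih x ⟨u, hut, he⟩
      exact ⟨j, by omega, hje, by rw [PySem.Dict.getD_insert_of_ne _ _ _ hx, hgd]⟩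

-- ---- periodic sums ----
theorem periodic_sum (a : Nat → Int) (j sec : Nat) (hsec : 0 < sec)
    (hper : ∀ u, j ≤ u → a (u + sec) = a u) :
    ∀ m, ((List.range (j + m)).map a).sum
      = ((List.range j).map a).sum + ((m / sec : Nat) : Int) * ((List.range' j sec).map a).sum
        + ((List.range' j (m % sec)).map a).sum := by
  intro m
  induction m using Nat.strong_induction_on with
  | _ m ih =>
    by_cases h : m < sec
    · rw [Nat.div_eq_of_lt h, Nat.mod_eq_of_lt h]
      have : List.range (j + m) = List.range' 0 j ++ List.range' j m := by
        rw [List.range_eq_range']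
        have := List.range'_append (s := 0) (m := j) (n := m) (step := 1)
        simpa using this.symm
      rw [this, List.map_append, List.sum_append, List.range_eq_range']
      ring
    · push_neg at h
      have hm : j + m = (j + sec) + (m - sec) := by omega
      have hsplit : List.range (j + m)
          = (List.range' 0 j ++ List.range' j sec) ++ List.range' (j + sec) (m - sec) := by
        rw [hm, List.range_eq_range']
        have h1 := List.range'_append (s := 0) (m := j) (n := sec) (step := 1)
        have h2 := List.range'_append (s := 0) (m := j + sec) (n := m - sec) (step := 1)
        simp only [one_mul, Nat.zero_add] at h1 h2
        rw [← h2, ← h1]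
      have hshift : ((List.range' (j + sec) (m - sec)).map a).sum
          = ((List.range' j (m - sec)).map a).sum := by
        rw [show j + sec = sec + j by omega, ← List.map_add_range' (s := j) (n := m - sec) (step := 1),
          List.map_map]
        refine congrArg _ (List.map_congr_left ?_)
        intro u hu
        have hju : j ≤ u := (List.mem_range'_1.mp hu).1
        simp only [Function.comp_apply]
        rw [show sec + u = u + sec by omega]
        exact hper u hju
      have hIH := ih (m - sec) (by omega)
      have hre : List.range (j + (m - sec)) = List.range' 0 j ++ List.range' j (m - sec) := by
        rw [List.range_eq_range']
        have := List.range'_append (s := 0) (m := j) (n := m - sec) (step := 1)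
        simpa using this.symm
      rw [hre, List.map_append, List.sum_append] at hIH
      rw [List.range_eq_range'] at hIH
      rw [hsplit, List.map_append, List.sum_append, List.map_append, List.sum_append, hshift]
      have hdiv : (m - sec) / sec = m / sec - 1 ∧ (m - sec) % sec = m % sec := by
        have h1 : m / sec = (m - sec) / sec + 1 := by
          conv_lhs => rw [show m = (m - sec) + sec by omega]
          rw [Nat.add_div_right _ hsec]
        have h2 : (m - sec) % sec = m % sec := by
          conv_rhs => rw [show m = (m - sec) + sec by omega]
          rw [Nat.add_mod_right]
        exact ⟨by simp [h1], h2⟩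
      rw [hdiv.2] at hIH
      rw [List.range_eq_range']
      have hq1 : 1 ≤ m / sec := (Nat.one_le_div_iff hsec).mpr h
      calc ((List.range' 0 j).map a).sum + ((List.range' j sec).map a).sum
            + (((List.range' j (m - sec)).map a).sum)
          = (((List.range' 0 j).map a).sum + ((List.range' j (m - sec)).map a).sum)
            + ((List.range' j sec).map a).sum := by ring
        _ = (((List.range' 0 j).map a).sum + (((m - sec) / sec : Nat) : Int) * ((List.range' j sec).map a).sum
            + ((List.range' j (m % sec)).map a).sum) + ((List.range' j sec).map a).sum := by
            rw [← hIH]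
        _ = ((List.range' 0 j).map a).sum + ((m / sec : Nat) : Int) * ((List.range' j sec).map a).sum
            + ((List.range' j (m % sec)).map a).sum := by
            rw [hdiv.1]
            rw [Nat.cast_sub hq1, Nat.cast_one]; ring

theorem final_sum (a : Nat → Int) (j t m : Nat) (hjt : j < t) (htm : t ≤ m)
    (hper : ∀ u, j ≤ u → a (u + (t - j)) = a u) :
    ((List.range m).map a).sum =
      ((List.range j).map a).sum
      + ((List.range' j (t - j)).map a).sum * (((m - j) / (t - j) : Nat) : Int)
      + ((List.range' j ((m - j) % (t - j))).map a).sum := by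
  have := periodic_sum a j (t - j) (by omega) hper (m - j)
  rw [show j + (m - j) = m by omega] at this
  rw [this]; ring

-- ---- periodicity of the start sequence ----
theorem sAt_periodic (k : Int) (q : List Int) (j t : Nat) (hjt : j ≤ t)
    (h : sAt k q t = sAt k q j) : ∀ u, j ≤ u → sAt k q (u + (t - j)) = sAt k q u := by
  have key : ∀ d, sAt k q (j + d + (t - j)) = sAt k q (j + d) := by
    intro d
    induction d with
    | zero => rw [show j + 0 + (t - j) = t by omega, h]; simp
    | succ d ih =>
      have e1 : j + (d+1) + (t - j) = (j + d + (t - j)) + 1 := by omega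
      rw [e1, show j + (d+1) = (j+d)+1 from rfl]
      show nxt k q (sAt k q (j + d + (t - j))) = nxt k q (sAt k q (j + d))
      rw [ih]
  intro u hu
  have := key (u - j)
  rwa [show j + (u - j) = u by omega] at this

theorem trAt_nil_fix (k : Int) (q : List Int) (hq : q ≠ []) (s : Nat)
    (h : trAt k q s = []) : loadOf k q s = 0 ∧ nxt k q s = s :=
  rideM_nil k q q.length 0 s false (List.length_pos_of_ne_nil hq) h

theorem aAt_periodic_of_key (k : Int) (q : List Int) (hq : q ≠ []) (j t : Nat) (hjt : j < t)
    (h : keyAt k q j = keyAt k q t) : ∀ u, j ≤ u → aAt k q (u + (t - j)) = aAt k q u := by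
  rcases enc_head_start _ _ h with ⟨h1, h2⟩ | ⟨x1, x2, s, r1, r2, h1, h2⟩
  · have hfix : ∀ u, j ≤ u → sAt k q u = sAt k q j ∧ aAt k q u = 0 := by
      intro u hu
      induction u with
      | zero =>
        have : j = 0 := by omega
        subst this
        exact ⟨rfl, (trAt_nil_fix k q hq _ h1).1⟩
      | succ u ih =>
        rcases Nat.lt_or_ge j (u+1) with hlt | hge
        · have hju : j ≤ u := by omega
          obtain ⟨hs, _⟩ := ih hju
          have hfix := trAt_nil_fix k q hq (sAt k q j) h1
          have hs1 : sAt k q (u+1) = sAt k q j := by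
            show nxt k q (sAt k q u) = _
            rw [hs, hfix.2]
          refine ⟨hs1, ?_⟩
          unfold aAt
          rw [hs1, hfix.1]
        · have : j = u + 1 := by omega
          subst this
          exact ⟨rfl, (trAt_nil_fix k q hq _ h1).1⟩
    intro u hu
    rw [(hfix (u + (t-j)) (by omega)).2, (hfix u hu).2]
  · have hs : sAt k q t = sAt k q j := by
      have e1 := rideM_head k q q.length 0 (sAt k q j) false _ _ h1
      have e2 := rideM_head k q q.length 0 (sAt k q t) false _ _ h2
      simp only at e1 e2
      rw [← e1, ← e2]
    have hsp := sAt_periodic k q j t (by omega) hs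
    intro u hu
    unfold aAt
    rw [hsp u hu]

-- ---- A-side: one ride of the flattened loop ----
theorem ride_steps (R k : Int) (q : List Int) : ∀ (f : Nat) (s : Nat) (tot : Int)
    (key : List Char) (rep : Bool) (l : List (List Char × Int)) (d : PySem.Dict (List Char) Int)
    (g : Nat), q ≠ [] → s < q.length → f ≤ q.length →
    solveLoop R k q ((rideM k q f tot s rep).1.length + g) (s : Int) key tot l d
        ((q.length : Int) - f) rep
      = solveLoop R k q g ((rideM k q f tot s rep).2.2.1 : Int)
          (key ++ enc (rideM k q f tot s rep).1) (rideM k q f tot s rep).2.1 l d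
          ((q.length : Int) - f + (rideM k q f tot s rep).1.length)
          (rideM k q f tot s rep).2.2.2 := by
  intro f
  induction f with
  | zero =>
    intro s tot key rep l d g hq hs hf
    simp [rideM, enc]
  | succ f ih =>
    intro s tot key rep l d g hq hs hf
    have hn : 0 < q.length := List.length_pos_of_ne_nil hq
    have hq0 : PySem.List.pyGet? q (s : Int) = some (q.getD s 0) := by
      rw [PySem.List.pyGet?_natCast, List.getElem?_eq_getElem hs, List.getD_eq_getElem q 0 hs]
    by_cases hc : tot + q.getD s 0 ≤ k
    · have hred : rideM k q (f+1) tot s rep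
          = ((q.getD s 0, s) :: (rideM k q f (tot + q.getD s 0) ((s + 1) % q.length)
              (rep || decide ((s + 1) % q.length = 0))).1,
             (rideM k q f (tot + q.getD s 0) ((s + 1) % q.length)
              (rep || decide ((s + 1) % q.length = 0))).2) := by
        simp only [rideM, if_pos hc]
      rw [hred]
      set s' := (s + 1) % q.length with hs'
      set rep' := rep || decide ((s + 1) % q.length = 0) with hrep'
      set tot' := tot + q.getD s 0 with htot'
      set r := rideM k q f tot' s' rep' with hr
      dsimp only [List.length_cons]
      rw [show r.1.length + 1 + g = (r.1.length + g) + 1 from by omega]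
      simp only [solveLoop, hq0]
      have hcond : ¬ (tot + q.getD s 0 > k ∨ ((q.length : Int) - ((f + 1 : Nat) : Int)) ≥ PySem.List.len q) := by
        rw [PySem.List.len_eq]
        push_cast
        omega
      rw [if_neg hcond]
      have hcast : PySem.Int.mod ((s : Int) + 1) (PySem.List.len q) = ((s' : Nat) : Int) := by
        rw [PySem.List.len_eq, show ((s : Int) + 1) = (((s + 1 : Nat)) : Int) by push_cast; ring,
          PySem.Int.mod_natCast]
      rw [hcast]
      have hrepif : (if rep = false ∧ ((s' : Nat) : Int) = 0 then true else rep) = rep' := by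
        rw [hrep']
        cases rep
        · simp only [Nat.cast_eq_zero]
          by_cases h0 : s' = 0 <;> simp [← hs', h0]
        · simp
      rw [hrepif]
      have hkl : (q.length : Int) - ((f + 1 : Nat) : Int) + 1 = (q.length : Int) - (f : Int) := by
        push_cast; ring
      rw [hkl]
      have hkl2 : (q.length : Int) - ((f + 1 : Nat) : Int) + ((r.1.length + 1 : Nat) : Int)
          = (q.length : Int) - (f : Int) + ((r.1.length : Nat) : Int) := by
        push_cast; ring
      rw [hkl2]
      have hs'lt : s' < q.length := Nat.mod_lt _ hn
      have hIH := ih s' tot' (key ++ ',' :: PySem.Int.toChars (q.getD s 0) ++ '-' :: PySem.Int.toChars (s : Int)) rep' l d g hq hs'lt (by omega)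
      rw [← hr] at hIH
      have henc : (key ++ ',' :: PySem.Int.toChars (q.getD s 0) ++ '-' :: PySem.Int.toChars (s : Int)) ++ enc r.1
          = key ++ enc ((q.getD s 0, s) :: r.1) := by
        simp [enc, seg, List.append_assoc]
      rw [henc] at hIH
      rw [← htot']
      exact hIH
    · have hred : rideM k q (f+1) tot s rep = ([], tot, s, rep) := by
        simp only [rideM, if_neg hc]
      rw [hred]
      simp [enc]

theorem range_take (j t : Nat) (h : j ≤ t) : (List.range t).take j = List.range' 0 j := by
  have hsplit : List.range t = List.range' 0 j ++ List.range' j (t - j) := by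
    have h2 : List.range' 0 j ++ List.range' j (t - j) = List.range' 0 t := by
      have := List.range'_append (s := 0) (m := j) (n := t - j) (step := 1)
      simp only [one_mul, Nat.zero_add] at this
      rw [this, show j + (t - j) = t by omega]
    rw [List.range_eq_range', ← h2]
  rw [hsplit]
  exact List.take_left' (by simp)

theorem range_drop (j t : Nat) (h : j ≤ t) : (List.range t).drop j = List.range' j (t - j) := by
  have hsplit : List.range t = List.range' 0 j ++ List.range' j (t - j) := by
    have h2 : List.range' 0 j ++ List.range' j (t - j) = List.range' 0 t := by
      have := List.range'_append (s := 0) (m := j) (n := t - j) (step := 1)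
      simp only [one_mul, Nat.zero_add] at this
      rw [this, show j + (t - j) = t by omega]
    rw [List.range_eq_range', ← h2]
  rw [hsplit]
  exact List.drop_left' (by simp)

theorem range'_take (j L r : Nat) (h : r ≤ L) : (List.range' j L).take r = List.range' j r := by
  have hsplit : List.range' j L = List.range' j r ++ List.range' (j + r) (L - r) := by
    have h2 : List.range' j r ++ List.range' (j + r) (L - r) = List.range' j L := by
      have := List.range'_append (s := j) (m := r) (n := L - r) (step := 1)
      simp only [one_mul] at this
      rw [this, show r + (L - r) = L by omega]
    rw [← h2]
  rw [hsplit]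
  exact List.take_left' (by simp)

theorem lAt_succ (k : Int) (q : List Int) (t : Nat) :
    lAt k q (t+1) = lAt k q t ++ [(keyAt k q t, aAt k q t)] := by
  unfold lAt
  rw [List.range_succ, List.map_append]
  simp

theorem mkD_succ (k : Int) (q : List Int) (t : Nat) :
    mkD k q (t+1) = (mkD k q t).insert (keyAt k q t) (t : Int) := by
  unfold mkD
  rw [List.range_succ, List.foldl_append]
  rfl

theorem length_lAt (k : Int) (q : List Int) (t : Nat) : (lAt k q t).length = t := by
  simp [lAt]

theorem boundaryA (R k : Int) (q : List Int) (hq : q ≠ []) (hR : 1 ≤ R) :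
    ∀ (c t : Nat) (rep : Bool) (g : Nat), t + c = R.toNat → 1 ≤ c →
    c * (q.length + 1) + 1 ≤ g →
    solveLoop R k q g ((sAt k q t : Nat) : Int) [] 0 (lAt k q t) (mkD k q t) 0 rep
      = Fseg k q 0 R.toNat := by
  intro c
  induction c with
  | zero => intro t rep g ht hc hg; omega
  | succ c ih =>
    intro t rep g ht hc hg
    have hmul : (c+1) * (q.length + 1) = c * (q.length + 1) + (q.length + 1) := by ring
    have hn : 0 < q.length := List.length_pos_of_ne_nil hq
    have hslt := sAt_lt k q hq t
    have htrlen := rideM_len_le k q q.length 0 (sAt k q t) rep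
    have htrlen2 : (trAt k q (sAt k q t)).length ≤ q.length :=
      rideM_len_le k q q.length 0 (sAt k q t) false
    have hride := ride_steps R k q q.length (sAt k q t) 0 [] rep (lAt k q t) (mkD k q t)
      (g - (rideM k q q.length 0 (sAt k q t) rep).1.length) hq hslt le_rfl
    rw [show (rideM k q q.length 0 (sAt k q t) rep).1.length +
        (g - (rideM k q q.length 0 (sAt k q t) rep).1.length) = g from by omega] at hride
    rw [sub_self, zero_add] at hride
    obtain ⟨e1, e2, e3⟩ := rideM_rep_any k q q.length 0 (sAt k q t) rep
    rw [e1, e2, e3, List.nil_append] at hride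
    have etr : (rideM k q q.length 0 (sAt k q t) false).1 = trAt k q (sAt k q t) := rfl
    have eload : (rideM k q q.length 0 (sAt k q t) false).2.1 = aAt k q t := rfl
    have enxt : (rideM k q q.length 0 (sAt k q t) false).2.2.1 = sAt k q (t+1) := rfl
    have ekey : enc (trAt k q (sAt k q t)) = keyAt k q t := rfl
    rw [etr, eload, enxt, ekey] at hride
    rw [hride]
    obtain ⟨g', hg'⟩ : ∃ g', g - (trAt k q (sAt k q t)).length = g' + 1 :=
      ⟨g - (trAt k q (sAt k q t)).length - 1, by omega⟩
    rw [hg']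
    have hslt' := sAt_lt k q hq (t+1)
    have hq2 : PySem.List.pyGet? q ((sAt k q (t+1) : Nat) : Int)
        = some (q.getD (sAt k q (t+1)) 0) := by
      rw [PySem.List.pyGet?_natCast, List.getElem?_eq_getElem hslt',
        List.getD_eq_getElem q 0 hslt']
    simp only [solveLoop, hq2]
    have hcondT : aAt k q t + q.getD (sAt k q (t+1)) 0 > k ∨
        ((trAt k q (sAt k q t)).length : Int) ≥ PySem.List.len q := by
      rcases rideM_end k q q.length 0 (sAt k q t) false with h | h
      · right
        rw [PySem.List.len_eq]
        have h2 : (trAt k q (sAt k q t)).length = q.length := h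
        omega
      · left
        exact h
    rw [if_pos hcondT]
    by_cases hb : ((rideM k q q.length 0 (sAt k q t) rep).2.2.2
        && (mkD k q t).contains (keyAt k q t)) = true
    · rw [if_pos hb]
      have hb2 : (rideM k q q.length 0 (sAt k q t) rep).2.2.2 = true ∧
          (mkD k q t).contains (keyAt k q t) = true := by simpa using hb
      have hcont : (mkD k q t).contains (keyAt k q t) = true := hb2.2
      obtain ⟨j, hj, hkey, hgd⟩ := getD_dOf (keyAt k q) t (keyAt k q t)
        ((contains_dOf (keyAt k q) t (keyAt k q t)).mp hcont)
      have hgd' : (mkD k q t).getD (keyAt k q t) 0 = (j : Int) := hgd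
      simp only [hgd', length_lAt]
      have hsec : (t : Int) - (j : Int) = ((t - j : Nat) : Int) := by omega
      have hRj : R - (j : Int) = ((R.toNat - j : Nat) : Int) := by omega
      rw [hsec, hRj, PySem.Int.floordiv_natCast, PySem.Int.mod_natCast]
      have hdropA : PySem.List.slice (lAt k q t) (some (j : Int)) none
          = (List.range' j (t - j)).map (fun u => (keyAt k q u, aAt k q u)) := by
        rw [PySem.List.slice_from_natCast]
        unfold lAt
        rw [← List.map_drop, range_drop j t (by omega)]
      have htakeA : PySem.List.slice (lAt k q t) (some 0) (some (j : Int))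
          = (List.range' 0 j).map (fun u => (keyAt k q u, aAt k q u)) := by
        rw [PySem.List.slice_zero_start, PySem.List.slice_to_natCast]
        unfold lAt
        rw [← List.map_take, range_take j t (by omega)]
      have hrem : (R.toNat - j) % (t - j) ≤ t - j := le_of_lt (Nat.mod_lt _ (by omega))
      have hpartA : PySem.List.slice (lAt k q t) (some (j : Int))
            (some ((j : Int) + (((R.toNat - j) % (t - j) : Nat) : Int)))
          = (List.range' j ((R.toNat - j) % (t - j))).map (fun u => (keyAt k q u, aAt k q u)) := by
        rw [PySem.List.slice_natCast_add]
        unfold lAt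
        rw [← List.map_drop, range_drop j t (by omega), ← List.map_take,
          range'_take j (t - j) _ hrem]
      rw [hdropA, htakeA, hpartA]
      simp only [List.map_map]
      have hper := aAt_periodic_of_key k q hq j t hj hkey
      have hfin := final_sum (aAt k q) j t R.toNat hj (by omega) hper
      unfold Fseg
      simp only [List.range_eq_range'] at hfin
      rw [hfin]
      rfl
    · rw [if_neg hb]
      have hlen1 : (((lAt k q t ++ [(keyAt k q t, aAt k q t)]).length : Nat) : Int) - 1
          = (t : Int) := by
        simp [length_lAt]
      rw [hlen1, ← lAt_succ, ← mkD_succ]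
      by_cases hret : (((lAt k q (t+1)).length : Nat) : Int) ≥ R
      · rw [if_pos hret]
        rw [length_lAt] at hret
        have hfold : ((lAt k q (t+1)).map (fun x => x.2)).sum = Fseg k q 0 (t+1) := by
          unfold lAt Fseg
          simp only [List.map_map, List.range_eq_range']
          rfl
        rw [hfold, show t + 1 = R.toNat from by omega]
      · rw [if_neg hret]
        rw [length_lAt] at hret
        exact ih (t+1) (rideM k q q.length 0 (sAt k q t) rep).2.2.2 g' (by omega)
          (by omega) (by omega)

theorem solveA (R k : Int) (q : List Int) (hq : q ≠ []) (hR : 1 ≤ R) :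
    solve R k q = Fseg k q 0 R.toNat := by
  unfold solve
  have hfuel : R.toNat * (q.length + 1) + 1 ≤ (R.toNat + 1) * (q.length + 1) + 1 := by
    have h2 : (R.toNat + 1) * (q.length + 1) = R.toNat * (q.length + 1) + (q.length + 1) := by ring
    omega
  exact boundaryA R k q hq hR R.toNat 0 false _ (by omega) (by omega) hfuel

-- ---- B-side: iterated rides and their partial sums ----
def iterN (k : Int) (q : List Int) : Nat → Nat → Nat
  | 0, s => s
  | m+1, s => iterN k q m (nxt k q s)

def Ssum (k : Int) (q : List Int) : Nat → Nat → Int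
  | 0, _ => 0
  | m+1, s => loadOf k q s + Ssum k q m (nxt k q s)

theorem iterN_add (k : Int) (q : List Int) : ∀ (a b : Nat) (s : Nat),
    iterN k q (a + b) s = iterN k q b (iterN k q a s) := by
  intro a
  induction a with
  | zero => intro b s; simp [iterN]
  | succ a ih =>
    intro b s
    rw [show a + 1 + b = (a + b) + 1 from by omega]
    show iterN k q (a + b) (nxt k q s) = iterN k q b (iterN k q a (nxt k q s))
    exact ih b (nxt k q s)

theorem Ssum_add (k : Int) (q : List Int) : ∀ (a b : Nat) (s : Nat),
    Ssum k q (a + b) s = Ssum k q a s + Ssum k q b (iterN k q a s) := by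
  intro a
  induction a with
  | zero => intro b s; simp [Ssum, iterN]
  | succ a ih =>
    intro b s
    rw [show a + 1 + b = (a + b) + 1 from by omega]
    show loadOf k q s + Ssum k q (a + b) (nxt k q s) = _
    rw [ih b (nxt k q s)]
    show _ = loadOf k q s + Ssum k q a (nxt k q s) + Ssum k q b (iterN k q (a+1) s)
    show _ = loadOf k q s + Ssum k q a (nxt k q s) + Ssum k q b (iterN k q a (nxt k q s))
    ring

theorem iterN_lt (k : Int) (q : List Int) (hq : q ≠ []) : ∀ (m s : Nat), s < q.length →
    iterN k q m s < q.length := by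
  intro m
  induction m with
  | zero => intro s hs; exact hs
  | succ m ih =>
    intro s hs
    exact ih (nxt k q s) (rideM_s_lt k q _ _ _ _ hs)

theorem sAt_eq_iterN (k : Int) (q : List Int) : ∀ t, sAt k q t = iterN k q t 0 := by
  intro t
  induction t with
  | zero => rfl
  | succ t ih =>
    show nxt k q (sAt k q t) = _
    rw [ih, show t + 1 = t + 1 from rfl, iterN_add k q t 1 0]
    rfl

theorem Fseg_eq_Ssum (k : Int) (q : List Int) : ∀ m, Fseg k q 0 m = Ssum k q m 0 := by
  intro m
  induction m with
  | zero => simp [Fseg, Ssum]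
  | succ m ih =>
    unfold Fseg
    rw [List.range'_concat, List.map_append, List.sum_append]
    unfold Fseg at ih
    rw [ih, Ssum_add k q m 1 0]
    simp only [Nat.zero_add, List.map_cons, List.map_nil, List.sum_cons, List.sum_nil]
    unfold aAt
    rw [sAt_eq_iterN]
    show _ = _ + (loadOf k q (iterN k q m 0) + Ssum k q 0 (nxt k q (iterN k q m 0)))
    simp [Ssum]

-- getD on a table built as (List.range n).map f
theorem getD_rmap (f : Nat → Int) (n t : Nat) (h : t < n) :
    PySem.List.pyGetD ((List.range n).map f) ((t : Nat) : Int) 0 = f t := by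
  rw [PySem.List.pyGetD_natCast]
  rw [List.getD_eq_getElem _ _ (by simpa using h)]
  simp

-- the bit loop invariant: tables hold m-step jump sums / destinations ⇒ the loop adds r*m steps
theorem altBits_eq (k : Int) (q : List Int) (hq : q ≠ []) :
    ∀ (f : Nat) (r : Int) (m : Nat) (ans : Int) (sN : Nat) (load nxt' : List Int),
    sN < q.length → 0 ≤ r → r.toNat < 2 ^ f →
    (∀ t, t < q.length → PySem.List.pyGetD load ((t : Nat) : Int) 0 = Ssum k q m t) →
    (∀ t, t < q.length → PySem.List.pyGetD nxt' ((t : Nat) : Int) 0 = ((iterN k q m t : Nat) : Int)) →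
    altBits q f r ans ((sN : Nat) : Int) load nxt' = ans + Ssum k q (r.toNat * m) sN := by
  intro f
  induction f with
  | zero =>
    intro r m ans sN load nxt' hs hr0 hrf hL hN
    have : r.toNat = 0 := by omega
    simp [altBits, this, Ssum]
  | succ f ih =>
    intro r m ans sN load nxt' hs hr0 hrf hL hN
    by_cases hr : r > 0
    · simp only [altBits, if_pos hr]
      have hrN : r = ((r.toNat : Nat) : Int) := by omega
      have hmod : PySem.Int.mod r 2 = ((r.toNat % 2 : Nat) : Int) := by
        rw [PySem.Int.mod_eq_emod_of_pos (show (0:Int) < 2 by omega)]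
        omega
      have hdiv : PySem.Int.floordiv r 2 = ((r.toNat / 2 : Nat) : Int) := by
        rw [PySem.Int.floordiv_eq_ediv_of_pos (show (0:Int) < 2 by omega)]
        omega
      set a := r.toNat / 2 with ha
      set b := r.toNat % 2 with hb
      have hbr : r.toNat = 2 * a + b ∧ b < 2 := by
        constructor
        · rw [ha, hb]; omega
        · rw [hb]; omega
      -- the new state after this pass
      have hsN' : (if (PySem.Int.mod r 2 == 1) then PySem.List.pyGetD nxt' ((sN : Nat) : Int) 0
            else ((sN : Nat) : Int))
          = (((if b = 1 then iterN k q m sN else sN) : Nat) : Int) := by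
        rw [hmod]
        by_cases hb1 : b = 1
        · rw [if_pos (by simp [← hb, hb1]), if_pos hb1]
          exact hN sN hs
        · rw [if_neg (by simp [← hb]; omega), if_neg hb1]
      have hans' : (if (PySem.Int.mod r 2 == 1) then ans + PySem.List.pyGetD load ((sN : Nat) : Int) 0
            else ans)
          = ans + (if b = 1 then Ssum k q m sN else 0) := by
        rw [hmod]
        by_cases hb1 : b = 1
        · rw [if_pos (by simp [← hb, hb1]), if_pos hb1, hL sN hs]
        · rw [if_neg (by simp [← hb]; omega), if_neg hb1, add_zero]
      rw [hsN', hans', hdiv]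
      have hLd : ∀ t, t < q.length →
          PySem.List.pyGetD ((List.range q.length).map (fun (t : Nat) =>
            PySem.List.pyGetD load ((t : Nat) : Int) 0 +
            PySem.List.pyGetD load (PySem.List.pyGetD nxt' ((t : Nat) : Int) 0) 0)) ((t : Nat) : Int) 0
          = Ssum k q (m + m) t := by
        intro t ht
        rw [getD_rmap _ _ _ ht, hL t ht, hN t ht,
          hL (iterN k q m t) (iterN_lt k q hq m t ht), Ssum_add]
      have hNd : ∀ t, t < q.length →
          PySem.List.pyGetD ((List.range q.length).map (fun (t : Nat) =>
            PySem.List.pyGetD nxt' (PySem.List.pyGetD nxt' ((t : Nat) : Int) 0) 0)) ((t : Nat) : Int) 0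
          = ((iterN k q (m + m) t : Nat) : Int) := by
        intro t ht
        rw [getD_rmap _ _ _ ht, hN t ht, hN (iterN k q m t) (iterN_lt k q hq m t ht),
          iterN_add]
      have hs' : (if b = 1 then iterN k q m sN else sN) < q.length := by
        by_cases hb1 : b = 1
        · rw [if_pos hb1]; exact iterN_lt k q hq m sN hs
        · rw [if_neg hb1]; exact hs
      have htoNat : (((a : Nat) : Int)).toNat = a := by simp
      have hIH := ih ((a : Nat) : Int) (m + m) (ans + (if b = 1 then Ssum k q m sN else 0))
        (if b = 1 then iterN k q m sN else sN) _ _ hs' (by positivity)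
        (by rw [htoNat]; omega)
        hLd hNd
      rw [hIH, htoNat]
      -- arithmetic: r.toNat * m = b * m + a * (m + m), combined through Ssum_add
      by_cases hb1 : b = 1
      · simp only [if_pos hb1]
        have hsplit : r.toNat * m = m + a * (m + m) := by
          have := hbr.1; rw [hb1] at this; rw [this]; ring
        rw [hsplit, Ssum_add k q m (a * (m + m)) sN]
        ring
      · have hb0 : b = 0 := by omega
        simp only [if_neg hb1]
        have hsplit : r.toNat * m = a * (m + m) := by
          have := hbr.1; rw [hb0] at this; rw [this]; ring
        rw [hsplit]
        ring
    · simp only [altBits, if_neg hr]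
      have : r.toNat = 0 := by omega
      simp [this, Ssum]

-- the precompute fold builds exactly the two mapped tables
theorem fold_pairs (g1 g2 : Nat → Int) : ∀ (l : List Nat) (a1 a2 : List Int),
    l.foldl (fun (p : List Int × List Int) s => (p.1 ++ [g1 s], p.2 ++ [g2 s])) (a1, a2)
      = (a1 ++ l.map g1, a2 ++ l.map g2) := by
  intro l
  induction l with
  | nil => intro a1 a2; simp
  | cons x l ih =>
    intro a1 a2
    simp only [List.foldl_cons, List.map_cons]
    rw [ih]
    simp

-- one precomputed ride equals the abstract ride (rep flag irrelevant)
theorem altRide_eq (k : Int) (q : List Int) (hq : q ≠ []) : ∀ (f : Nat) (tot : Int) (s : Nat)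
    (rep : Bool), s < q.length →
    altRide k q f tot ((s : Nat) : Int)
      = ((rideM k q f tot s rep).2.1, ((rideM k q f tot s rep).2.2.1 : Int)) := by
  intro f
  induction f with
  | zero => intro tot s rep hs; simp [altRide, rideM]
  | succ f ih =>
    intro tot s rep hs
    simp only [altRide, rideM, PySem.List.pyGetD_natCast]
    by_cases hc : tot + q.getD s 0 ≤ k
    · rw [if_pos hc, if_pos hc]
      have hcast : PySem.Int.mod ((s : Int) + 1) (PySem.List.len q)
          = (((s + 1) % q.length : Nat) : Int) := by
        rw [PySem.List.len_eq, show ((s : Int) + 1) = (((s + 1 : Nat)) : Int) by push_cast; ring,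
          PySem.Int.mod_natCast]
      rw [hcast]
      exact ih _ _ _ (Nat.mod_lt _ (List.length_pos_of_ne_nil hq))
    · rw [if_neg hc, if_neg hc]

theorem solveB (R k : Int) (q : List Int) (hq : q ≠ []) (hR : 1 ≤ R) :
    solve_alt R k q = Fseg k q 0 R.toNat := by
  unfold solve_alt
  rw [fold_pairs (fun (s : Nat) => (altRide k q q.length 0 (s : Int)).1)
    (fun (s : Nat) => (altRide k q q.length 0 (s : Int)).2) (List.range q.length) [] []]
  simp only [List.nil_append]
  have hL : ∀ t, t < q.length →
      PySem.List.pyGetD ((List.range q.length).map (fun (s : Nat) => (altRide k q q.length 0 (s : Int)).1))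
        ((t : Nat) : Int) 0 = Ssum k q 1 t := by
    intro t ht
    rw [getD_rmap _ _ _ ht, altRide_eq k q hq q.length 0 t false ht]
    show loadOf k q t = _
    simp [Ssum]
  have hN : ∀ t, t < q.length →
      PySem.List.pyGetD ((List.range q.length).map (fun (s : Nat) => (altRide k q q.length 0 (s : Int)).2))
        ((t : Nat) : Int) 0 = ((iterN k q 1 t : Nat) : Int) := by
    intro t ht
    rw [getD_rmap _ _ _ ht, altRide_eq k q hq q.length 0 t false ht]
    rfl
  have hmain := altBits_eq k q hq (R.toNat + 1) R 1 0 0 _ _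
    (List.length_pos_of_ne_nil hq) (by omega)
    (lt_of_lt_of_le (Nat.lt_two_pow_self) (Nat.pow_le_pow_right (by omega) (by omega)))
    hL hN
  rw [Nat.cast_zero] at hmain
  rw [hmain, Nat.mul_one, zero_add, Fseg_eq_Ssum]

-- ===== VERDICT (by name: the statement is the Claim_ definition above) =====
theorem solve_spec : Claim_equal_solve := by
  intro R k q _ hpre
  unfold Spec_solve
  rw [solveA R k q hpre.2 hpre.1, solveB R k q hpre.2 hpre.1]
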